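-- pv_equiv track=rewrite | github.com/mayankpahade611/Emergency_Env | Environment/grader.py | match_action
-- ===== SOURCE A (Python) =====
-- def normalize(text: str) -> str:
--     return text.lower().strip()
--
-- SYNONYMS = {
--     "call ambulance": ["call 911", "call emergency services", "call help"],
--     "call fire department": ["call firefighters", "call emergency services"],
--     "control bleeding": ["stop bleeding", "apply pressure", "administer first aid"],
--     "check pulse": ["check breathing", "check responsiveness"],
--     "evacuate": ["leave the area", "get out", "evacuate immediately"],
--     "alert police": ["call police", "inform police"]
-- }
--
-- def match_action(predicted: str, correct_actions: set) -> bool: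
--     predicted = normalize(predicted)
--
--     # Direct match
--     if predicted in correct_actions:
--         return True
--
--     # Synonym match
--     for key, values in SYNONYMS.items():
--         if predicted in values and key in correct_actions:
--             return True
--
--     return False
-- ===== SOURCE B (Python) =====
-- def normalize(text: str) -> str:
--     return text.lower().strip()
--
-- SYNONYMS = {
--     "call ambulance": ["call 911", "call emergency services", "call help"],
--     "call fire department": ["call firefighters", "call emergency services"],
--     "control bleeding": ["stop bleeding", "apply pressure", "administer first aid"],
--     "check pulse": ["check breathing", "check responsiveness"],
--     "evacuate": ["leave the area", "get out", "evacuate immediately"],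
--     "alert police": ["call police", "inform police"]
-- }
--
-- def match_action(predicted: str, correct_actions: set) -> bool:
--     predicted = normalize(predicted)
--     acceptable = set(correct_actions)
--     for key in correct_actions:
--         if key in SYNONYMS:
--             acceptable.update(SYNONYMS[key])
--     return predicted in acceptable
-- ===== Notes on version B (the rewrite author's own statement) =====
-- stated objective: simpler
-- what changed: Instead of scanning the whole SYNONYMS table and testing each key against correct_actions, B expands only the correct actions that have synonyms into one acceptance set and does a single membership test.
import Mathlib
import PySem

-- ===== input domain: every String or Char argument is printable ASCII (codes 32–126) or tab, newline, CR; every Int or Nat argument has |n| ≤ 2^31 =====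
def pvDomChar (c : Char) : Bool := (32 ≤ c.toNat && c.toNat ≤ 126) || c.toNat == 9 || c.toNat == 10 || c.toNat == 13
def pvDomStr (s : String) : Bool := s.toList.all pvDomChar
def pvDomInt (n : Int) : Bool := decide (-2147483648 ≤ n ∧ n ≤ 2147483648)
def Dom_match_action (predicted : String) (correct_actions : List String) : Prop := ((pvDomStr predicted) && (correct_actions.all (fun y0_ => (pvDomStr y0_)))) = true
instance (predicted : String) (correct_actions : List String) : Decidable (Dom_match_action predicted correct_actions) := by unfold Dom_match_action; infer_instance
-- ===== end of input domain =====

-- B replaces A's scan of the whole SYNONYMS table by expanding the matched correct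
-- actions into an acceptance set and doing one membership test (simpler decomposition).

-- ===== PORT A =====
-- pyNormalize(text) = text.lower().strip()
def pyNormalize (text : String) : String := PySem.Str.strip (PySem.Str.lower text)

-- the module-level SYNONYMS dict, literal
def SYNONYMS : PySem.Dict String (List String) := PySem.Dict.mk [
 ("call ambulance", ["call 911", "call emergency services", "call help"]),
 ("call fire department", ["call firefighters", "call emergency services"]),
 ("control bleeding", ["stop bleeding", "apply pressure", "administer first aid"]),
 ("check pulse", ["check breathing", "check responsiveness"]),
 ("evacuate", ["leave the area", "get out", "evacuate immediately"]),
 ("alert police", ["call police", "inform police"])]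

-- the 'for key, values in SYNONYMS.items(): if … return True' loop is List.any over items
def match_action (predicted : String) (correct_actions : List String) : Bool :=
  let predicted := pyNormalize predicted
  if correct_actions.contains predicted then true
  else if (PySem.Dict.items SYNONYMS).any
      (fun kv => kv.2.contains predicted && correct_actions.contains kv.1) then true
  else false

-- ===== PORT B =====
def match_action_alt (predicted : String) (correct_actions : List String) : Bool :=
  let predicted := pyNormalize predicted
  let acceptable : PySem.Set String := PySem.Set.ofList correct_actions
  let acceptable := correct_actions.foldl
      (fun s key => if PySem.Dict.contains SYNONYMS key
                    then PySem.Set.update s (PySem.Dict.getD SYNONYMS key [])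
                    else s) acceptable
  PySem.Set.contains acceptable predicted

-- ===== PRECONDITION & SPEC =====
def Spec_match_action (predicted : String) (correct_actions : List String) (out : Bool) : Prop := out = match_action_alt predicted correct_actions
instance (predicted : String) (correct_actions : List String) (out : Bool) : Decidable (Spec_match_action predicted correct_actions out) := by unfold Spec_match_action; infer_instance

-- ===== CLAIM (what is proved, stated in full; the proofs are below) =====
def Claim_equal_match_action : Prop := ∀ (predicted : String) (correct_actions : List String), Dom_match_action predicted correct_actions → Spec_match_action predicted correct_actions (match_action predicted correct_actions)

-- ===== LEMMAS AND PROOFS =====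

-- membership in B's accumulated acceptance set
lemma mem_acceptable_fold (p : String) (l : List String) (s : PySem.Set String) :
    p ∈ l.foldl (fun s key => if PySem.Dict.contains SYNONYMS key
                    then PySem.Set.update s (PySem.Dict.getD SYNONYMS key [])
                    else s) s ↔
    p ∈ s ∨ ∃ k ∈ l, PySem.Dict.contains SYNONYMS k = true ∧ p ∈ PySem.Dict.getD SYNONYMS k [] := by
  induction l generalizing s with
  | nil => simp
  | cons x xs ih =>
    simp only [List.foldl_cons]
    by_cases hx : PySem.Dict.contains SYNONYMS x = true
    · rw [if_pos hx, ih]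
      simp only [PySem.Set.mem_update, List.mem_cons]
      constructor
      · rintro ((h | h) | ⟨k, hk, h1, h2⟩)
        · exact Or.inl h
        · exact Or.inr ⟨x, Or.inl rfl, hx, h⟩
        · exact Or.inr ⟨k, Or.inr hk, h1, h2⟩
      · rintro (h | ⟨k, (rfl | hk), h1, h2⟩)
        · exact Or.inl (Or.inl h)
        · exact Or.inl (Or.inr h2)
        · exact Or.inr ⟨k, hk, h1, h2⟩
    · rw [if_neg hx, ih]
      simp only [List.mem_cons]
      constructor
      · rintro (h | ⟨k, hk, h1, h2⟩)
        · exact Or.inl h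
        · exact Or.inr ⟨k, Or.inr hk, h1, h2⟩
      · rintro (h | ⟨k, (rfl | hk), h1, h2⟩)
        · exact Or.inl h
        · exact absurd h1 hx
        · exact Or.inr ⟨k, hk, h1, h2⟩

lemma synonyms_keys_nodup : (PySem.Dict.keys SYNONYMS).Nodup := by decide

theorem match_action_spec_aux (p : String) (c : List String) :
    match_action p c = match_action_alt p c := by
  rw [Bool.eq_iff_iff]
  unfold match_action match_action_alt
  simp only [PySem.Set.contains_iff, mem_acceptable_fold, PySem.Set.mem_ofList]
  constructor
  · intro h
    split_ifs at h with h1 h2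
    · left; simpa using h1
    · right
      simp only [List.any_eq_true] at h2
      obtain ⟨⟨k0, v0⟩, hkv, hh⟩ := h2
      simp only [Bool.and_eq_true, List.contains_eq_mem, decide_eq_true_eq] at hh
      have hget : PySem.Dict.get? SYNONYMS k0 = some v0 :=
        PySem.Dict.get?_of_mem_items SYNONYMS hkv synonyms_keys_nodup
      refine ⟨k0, hh.2, ?_, ?_⟩
      · rw [PySem.Dict.contains_eq_isSome_get?, hget]; rfl
      · rw [PySem.Dict.getD_of_get?_eq_some SYNONYMS [] hget]; exact hh.1
  · intro h
    split_ifs with h1 h2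
    · rfl
    · rfl
    · exfalso
      rcases h with h | ⟨k, hk, hcon, hmem⟩
      · exact h1 (by simpa using h)
      · apply h2
        rw [PySem.Dict.contains_eq_isSome_get?] at hcon
        obtain ⟨v, hv⟩ := Option.isSome_iff_exists.mp hcon
        rw [PySem.Dict.getD_of_get?_eq_some SYNONYMS [] hv] at hmem
        simp only [List.any_eq_true]
        exact ⟨(k, v), PySem.Dict.mem_items_of_get?_eq_some SYNONYMS hv,
          by simpa using ⟨hmem, hk⟩⟩

-- ===== VERDICT (by name: the statement is the Claim_ definition above) =====
theorem match_action_spec : Claim_equal_match_action := by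
  intro p c _
  exact match_action_spec_aux p c
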